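-- pv_equiv track=rewrite | github.com/thomasleyden/DistributedSystems | popular_matching.py | get_applicant_posts
-- ===== SOURCE A (Python) =====
-- def get_applicant_posts(applicant_preferences):
--     # Get a list of post which an applicant wants in order
--     applicant_post_list = []
--     preference_number = 1
--
--     for post_number in range(0, len(applicant_preferences)):
--         try:
--             post_found = applicant_preferences.index(preference_number)
--             applicant_post_list.append(post_found)
--         except:
--             pass
--         preference_number = preference_number + 1
--
--     return applicant_post_list
-- ===== SOURCE B (Python) =====
-- def get_applicant_posts(applicant_preferences):
--     # Sort (value, index) pairs once, then a single scan: ascending values give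
--     # the rank order 1..n, the ascending index tie-break makes the first pair of
--     # each value carry its smallest index, and values outside 1..n are dropped.
--     n = len(applicant_preferences)
--     result = []
--     prev = None
--     for v, i in sorted((v, i) for i, v in enumerate(applicant_preferences)):
--         if v != prev and 1 <= v <= n:
--             result.append(i)
--         prev = v
--     return result
-- ===== Notes on version B (the rewrite author's own statement) =====
-- stated objective: faster
-- what changed: Replaces the per-rank linear .index scans with one sort of (value, index) pairs followed by a single dedup-and-filter scan: ascending values reproduce the rank order, the index tie-break reproduces .index's first-occurrence choice.
import Mathlib
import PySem

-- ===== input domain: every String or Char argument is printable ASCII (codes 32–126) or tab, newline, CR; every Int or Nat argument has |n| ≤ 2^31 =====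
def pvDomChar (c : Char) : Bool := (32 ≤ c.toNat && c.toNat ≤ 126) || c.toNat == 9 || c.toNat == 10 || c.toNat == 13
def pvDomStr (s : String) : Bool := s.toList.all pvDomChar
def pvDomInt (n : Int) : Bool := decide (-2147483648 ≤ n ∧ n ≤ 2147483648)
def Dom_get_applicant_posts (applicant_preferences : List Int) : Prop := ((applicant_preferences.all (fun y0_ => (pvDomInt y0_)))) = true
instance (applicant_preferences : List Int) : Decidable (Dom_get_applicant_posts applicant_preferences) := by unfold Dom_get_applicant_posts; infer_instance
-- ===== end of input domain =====

-- B replaces A's per-rank linear .index scans by one sort of (value, index) pairs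
-- followed by a single dedup-and-filter scan (faster).

-- ===== PORT A =====
-- for post_number in range(0, len(xs)): try append xs.index(pref) except pass; pref += 1
def get_applicant_posts (applicant_preferences : List Int) : List Int :=
  ((PySem.List.pyRange 0 (applicant_preferences.length : Int) 1).foldl
    (fun st _post_number =>
      let st1 :=
        match PySem.List.index? applicant_preferences st.2 with
        | some post_found => (st.1 ++ [(post_found : Int)], st.2)
        | none => st
      (st1.1, st1.2 + 1))
    (([] : List Int), (1 : Int))).1

-- ===== PORT B =====
-- sorted((v, i) for i, v in enumerate(xs)); one scan keeping the first pair of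
-- each new value v with 1 <= v <= n
def get_applicant_posts_alt (applicant_preferences : List Int) : List Int :=
  let n : Int := (applicant_preferences.length : Int)
  ((PySem.List.sorted2
      ((PySem.List.enumerate applicant_preferences 0).map (fun iv => (iv.2, iv.1)))
      Prod.fst Prod.snd).foldl
    (fun st vi =>
      (if st.2 ≠ some vi.1 ∧ 1 ≤ vi.1 ∧ vi.1 ≤ n then st.1 ++ [vi.2] else st.1,
       some vi.1))
    (([] : List Int), (none : Option Int))).1

-- ===== PRECONDITION & SPEC =====
def Spec_get_applicant_posts (applicant_preferences : List Int) (out : List Int) : Prop := out = get_applicant_posts_alt applicant_preferences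
instance (applicant_preferences : List Int) (out : List Int) : Decidable (Spec_get_applicant_posts applicant_preferences out) := by unfold Spec_get_applicant_posts; infer_instance

-- ===== CLAIM (what is proved, stated in full; the proofs are below) =====
def Claim_equal_get_applicant_posts : Prop := ∀ (applicant_preferences : List Int), Dom_get_applicant_posts applicant_preferences → Spec_get_applicant_posts applicant_preferences (get_applicant_posts applicant_preferences)

-- ===== LEMMAS AND PROOFS =====

-- the (value, index) pairs B sorts
def pvPairs (xs : List Int) : List (Int × Int) :=
  (PySem.List.enumerate xs 0).map (fun iv => (iv.2, iv.1))

-- B's scan as a structural recursion (proof-side mirror of the fold)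
def pvCore (n : Int) : List (Int × Int) → Option Int → List Int
  | [], _ => []
  | (v, i) :: t, prev =>
      if prev ≠ some v ∧ 1 ≤ v ∧ v ≤ n then i :: pvCore n t (some v)
      else pvCore n t (some v)

-- the common normal form: first-occurrence indices of the ranks L..n present in xs
def pvRhs (xs : List Int) (L : Int) : List Int :=
  (PySem.List.pyRange L ((xs.length : Int) + 1) 1).filterMap
    (fun q => (PySem.List.index? xs q).map (fun k => (k : Int)))

-- A's loop, generalized: the loop variable is unused, pref counts up from p.
theorem aLoop (xs : List Int) (l : List Int) (acc : List Int) (p : Int) :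
    ((l.foldl
      (fun st (_ : Int) =>
        let st1 :=
          match PySem.List.index? xs st.2 with
          | some post_found => (st.1 ++ [(post_found : Int)], st.2)
          | none => st
        (st1.1, st1.2 + 1))
      (acc, p))).1
    = acc ++ (PySem.List.pyRange p (p + (l.length : Int)) 1).filterMap
        (fun q => (PySem.List.index? xs q).map (fun k => (k : Int))) := by
  induction l generalizing acc p with
  | nil => simp [PySem.List.pyRange_one_eq_nil (le_refl p)]
  | cons y l ih =>
    have he : p + ((l.length : Int) + 1) = (p + 1) + (l.length : Int) := by ring
    simp only [List.length_cons]
    push_cast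
    rw [he, PySem.List.pyRange_one_cons (by omega), List.filterMap_cons,
      List.foldl_cons]
    cases h : PySem.List.index? xs p with
    | some k => rw [ih]; simp
    | none => rw [ih]; simp

theorem a_eq_rhs (xs : List Int) : get_applicant_posts xs = pvRhs xs 1 := by
  unfold get_applicant_posts pvRhs
  rw [aLoop xs _ [] 1]
  simp only [List.nil_append, PySem.List.length_pyRange_one, Int.sub_zero,
    Int.toNat_natCast, add_comm (1 : Int)]

-- Python's default tuple sort is the lexicographic one
theorem sorted2_eq_sorted_lex (l : List (Int × Int)) :
    PySem.List.sorted2 l Prod.fst Prod.snd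
      = PySem.List.sorted l (fun p => toLex p) := by
  rw [PySem.List.sorted_eq_foldl_insertBy]
  unfold PySem.List.sorted2
  simp only [if_neg (by decide : ¬ (false = true))]
  have hbe : (fun (a b : Int × Int) =>
        decide (a.1 < b.1) || (!decide (b.1 < a.1) && decide (a.2 < b.2)))
      = (fun (a b : Int × Int) => decide (toLex a < toLex b)) := by
    funext a b
    rw [Bool.eq_iff_iff]
    simp only [Bool.or_eq_true, Bool.and_eq_true, Bool.not_eq_true', decide_eq_true_eq,
      decide_eq_false_iff_not, Prod.Lex.lt_iff, ofLex_toLex]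
    omega
  rw [hbe]

-- B's fold is acc ++ pvCore
theorem foldl_eq_core (n : Int) (s : List (Int × Int)) (acc : List Int) (prev : Option Int) :
    (s.foldl
      (fun st vi =>
        (if st.2 ≠ some vi.1 ∧ 1 ≤ vi.1 ∧ vi.1 ≤ n then st.1 ++ [vi.2] else st.1,
         some vi.1))
      (acc, prev)).1 = acc ++ pvCore n s prev := by
  induction s generalizing acc prev with
  | nil => simp [pvCore]
  | cons p t ih =>
    rcases p with ⟨v, i⟩
    simp only [List.foldl_cons, pvCore]
    split_ifs with h <;> rw [ih] <;> simp

-- a run of pairs with the just-seen value is skipped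
theorem core_skip (n v : Int) (g r : List (Int × Int))
    (h : ∀ p ∈ g, p.1 = v) :
    pvCore n (g ++ r) (some v) = pvCore n r (some v) := by
  induction g with
  | nil => rfl
  | cons p g ih =>
    rcases p with ⟨w, j⟩
    have hw : w = v := h (w, j) (by simp)
    subst hw
    simp only [List.cons_append, pvCore, ne_eq, not_true_eq_false, false_and,
      if_false]
    exact ih (fun p hp => h p (by simp [hp]))

-- once every remaining value exceeds n, nothing more is appended
theorem core_big (n : Int) (s : List (Int × Int)) (prev : Option Int)
    (h : ∀ p ∈ s, n < p.1) : pvCore n s prev = [] := by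
  induction s generalizing prev with
  | nil => rfl
  | cons p t ih =>
    rcases p with ⟨v, i⟩
    have hv : n < v := h (v, i) (by simp)
    simp only [pvCore, if_neg (by omega : ¬ (prev ≠ some v ∧ 1 ≤ v ∧ v ≤ n))]
    exact ih (some v) (fun p hp => h p (by simp [hp]))

theorem mem_pvPairs (xs : List Int) (v i : Int) :
    (v, i) ∈ pvPairs xs ↔ ∃ (k : Nat) (h : k < xs.length), i = (k : Int) ∧ v = xs[k] := by
  unfold pvPairs
  simp only [List.mem_map, PySem.List.mem_enumerate_iff]
  constructor
  · rintro ⟨⟨j, w⟩, ⟨k, hk, hp⟩, he⟩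
    simp only [Prod.mk.injEq] at hp he
    refine ⟨k, hk, by omega, ?_⟩
    rw [← he.1, hp.2]
  · rintro ⟨k, hk, hi, hv⟩
    exact ⟨(0 + (k : Int), xs[k]), ⟨k, hk, rfl⟩, by simp [hi, hv]⟩

theorem index?_first (xs : List Int) (v : Int) (k : Nat) (hk : k < xs.length)
    (hget : xs[k] = v) (hmin : ∀ j (hj : j < xs.length), j < k → xs[j] ≠ v) :
    PySem.List.index? xs v = some k := by
  rw [PySem.List.index?_eq_some_iff]
  refine ⟨xs.take k, xs.drop (k + 1), ?_, ?_, ?_⟩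
  · rw [← hget]
    conv_lhs => rw [← List.take_append_drop k xs]
    congr 1
    rw [List.drop_eq_getElem_cons hk]
  · simp [List.length_take, Nat.min_eq_left (Nat.le_of_lt hk)]
  · intro hvmem
    rw [List.mem_take_iff_getElem] at hvmem
    rcases hvmem with ⟨j, hj, hjv⟩
    have hjlt : j < k := by omega
    have hjx : j < xs.length := by omega
    exact hmin j hjx hjlt (by simpa using hjv)

-- a rank segment none of whose members occurs in xs contributes nothing
theorem rhs_none_seg (xs : List Int) (L V : Int)
    (h : ∀ q : Int, L ≤ q → q < V → PySem.List.index? xs q = none) :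
    (PySem.List.pyRange L V 1).filterMap
      (fun q => (PySem.List.index? xs q).map (fun k => (k : Int))) = [] := by
  apply List.filterMap_eq_nil_iff.mpr
  intro q hq
  rw [PySem.List.mem_pyRange_one] at hq
  rw [h q hq.1 hq.2]
  rfl

theorem pvMain (xs : List Int) :
    ∀ (m : Nat) (s : List (Int × Int)) (b : Int) (prev : Option Int),
      s.length ≤ m →
      s.Pairwise (fun p q => toLex p ≤ toLex q) →
      s.Perm ((pvPairs xs).filter (fun p => decide (b < p.1))) →
      (∀ w, prev = some w → w ≤ b) →
      pvCore (xs.length : Int) s prev = pvRhs xs (max (b + 1) 1) := by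
  intro m
  induction m with
  | zero =>
    intro s b prev hlen hpair hperm hprev
    have hs : s = [] := List.eq_nil_of_length_eq_zero (Nat.le_zero.mp hlen)
    subst hs
    have hfil : (pvPairs xs).filter (fun p => decide (b < p.1)) = [] :=
      (hperm.symm).eq_nil
    rw [show pvCore (xs.length : Int) [] prev = [] from rfl]
    symm
    unfold pvRhs
    apply rhs_none_seg
    intro q hq1 _
    rw [PySem.List.index?_eq_none_iff]
    intro hqx
    rcases List.mem_iff_getElem.mp hqx with ⟨k, hk, hget⟩
    have hp : (q, (k : Int)) ∈ pvPairs xs := (mem_pvPairs xs q (k : Int)).mpr ⟨k, hk, rfl, hget.symm⟩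
    have : (q, (k : Int)) ∈ (pvPairs xs).filter (fun p => decide (b < p.1)) :=
      List.mem_filter.mpr ⟨hp, by simp; omega⟩
    rw [hfil] at this
    exact absurd this (List.not_mem_nil)
  | succ m ih =>
    intro s b prev hlen hpair hperm hprev
    cases s with
    | nil =>
      have hfil : (pvPairs xs).filter (fun p => decide (b < p.1)) = [] :=
        (hperm.symm).eq_nil
      rw [show pvCore (xs.length : Int) [] prev = [] from rfl]
      symm
      unfold pvRhs
      apply rhs_none_seg
      intro q hq1 _
      rw [PySem.List.index?_eq_none_iff]
      intro hqx
      rcases List.mem_iff_getElem.mp hqx with ⟨k, hk, hget⟩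
      have hp : (q, (k : Int)) ∈ pvPairs xs := (mem_pvPairs xs q (k : Int)).mpr ⟨k, hk, rfl, hget.symm⟩
      have : (q, (k : Int)) ∈ (pvPairs xs).filter (fun p => decide (b < p.1)) :=
        List.mem_filter.mpr ⟨hp, by simp; omega⟩
      rw [hfil] at this
      exact absurd this (List.not_mem_nil)
    | cons hd t =>
      rcases hd with ⟨v, i⟩
      -- basic facts about the head
      have hmem_head : (v, i) ∈ (pvPairs xs).filter (fun p => decide (b < p.1)) :=
        hperm.subset (List.mem_cons_self)
      have hbv : b < v := by
        have := (List.mem_filter.mp hmem_head).2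
        simpa using this
      have hpvp : (v, i) ∈ pvPairs xs := (List.mem_filter.mp hmem_head).1
      have hHead : ∀ q ∈ t, toLex (v, i) ≤ toLex q := (List.pairwise_cons.mp hpair).1
      have hpt : t.Pairwise (fun p q => toLex p ≤ toLex q) := (List.pairwise_cons.mp hpair).2
      have hall : ∀ p ∈ (v, i) :: t, v ≤ p.1 := by
        intro p hp
        rcases List.mem_cons.mp hp with rfl | hp'
        · exact le_refl v
        · have := hHead p hp'
          rw [Prod.Lex.le_iff] at this
          simp only [ofLex_toLex] at this
          omega
      have hqmem : ∀ q : Int, b < q → q ∈ xs → v ≤ q := by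
        intro q hbq hqx
        rcases List.mem_iff_getElem.mp hqx with ⟨k, hk, hget⟩
        have hp : (q, (k : Int)) ∈ pvPairs xs := (mem_pvPairs xs q (k : Int)).mpr ⟨k, hk, rfl, hget.symm⟩
        have hins : (q, (k : Int)) ∈ (v, i) :: t :=
          hperm.mem_iff.mpr (List.mem_filter.mpr ⟨hp, by simp; omega⟩)
        have := hall _ hins
        simpa using this
      -- split the tail into the value-v run and the rest
      have htgr : t = t.takeWhile (fun p => decide (p.1 = v)) ++ t.dropWhile (fun p => decide (p.1 = v)) :=
        (List.takeWhile_append_dropWhile).symm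
      have hgv : ∀ p ∈ t.takeWhile (fun p => decide (p.1 = v)), p.1 = v := by
        intro p hp
        have := List.mem_takeWhile_imp hp
        simpa using this
      have hrt : (t.dropWhile (fun p => decide (p.1 = v))).Sublist t := List.dropWhile_sublist _
      have hpr : (t.dropWhile (fun p => decide (p.1 = v))).Pairwise (fun p q => toLex p ≤ toLex q) :=
        hpt.sublist hrt
      have hrv : ∀ p ∈ t.dropWhile (fun p => decide (p.1 = v)), v < p.1 := by
        cases hr : t.dropWhile (fun p => decide (p.1 = v)) with
        | nil => simp
        | cons p0 r' =>
          have hp0ne : p0.1 ≠ v := by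
            have hw : t.dropWhile (fun p => decide (p.1 = v)) ≠ [] := by rw [hr]; simp
            have hne := List.head_dropWhile_not (fun (p : Int × Int) => decide (p.1 = v)) hw
            rw [show (t.dropWhile (fun p => decide (p.1 = v))).head hw = p0 by simp [hr]] at hne
            simpa using hne
          have hp0t : p0 ∈ t := hrt.subset (hr ▸ List.mem_cons_self)
          have hp0 : v < p0.1 :=
            lt_of_le_of_ne (hall p0 (List.mem_cons_of_mem _ hp0t)) (fun h => hp0ne h.symm)
          intro p hp
          rcases List.mem_cons.mp hp with rfl | hp'
          · exact hp0
          · have hle := (List.pairwise_cons.mp (hr ▸ hpr)).1 p hp'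
            rw [Prod.Lex.le_iff] at hle
            simp only [ofLex_toLex] at hle
            omega
      -- the rest is exactly the pairs with value above v
      have hfil_s : ((v, i) :: t).filter (fun p => decide (v < p.1)) = t.dropWhile (fun p => decide (p.1 = v)) := by
        conv_lhs => rw [htgr]
        simp only [List.filter_cons, List.filter_append]
        rw [if_neg (by simp)]
        rw [List.filter_eq_nil_iff.mpr (by
          intro p hp
          have := hgv p hp
          simp [this])]
        rw [List.filter_eq_self.mpr (by
          intro p hp
          simpa using hrv p hp)]
        simp
      have hrperm : (t.dropWhile (fun p => decide (p.1 = v))).Perm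
          ((pvPairs xs).filter (fun p => decide (v < p.1))) := by
        have h1 := hperm.filter (fun p => decide (v < p.1))
        rw [hfil_s] at h1
        have h2 : ((pvPairs xs).filter (fun p => decide (b < p.1))).filter (fun p => decide (v < p.1))
            = (pvPairs xs).filter (fun p => decide (v < p.1)) := by
          rw [List.filter_filter]
          apply List.filter_congr
          intro p _
          by_cases h : v < p.1
          · simp only [h, decide_true, Bool.true_and]
            simp
            omega
          · simp [h]
        rw [h2] at h1
        exact h1
      -- length bookkeeping
      have hlr : (t.dropWhile (fun p => decide (p.1 = v))).length ≤ m := by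
        have h1 := hrt.length_le
        simp only [List.length_cons] at hlen
        omega
      by_cases hv1 : v ≤ 0
      · -- rank below 1: dropped by the scan, absent from the rank range
        have hcond : ¬ (prev ≠ some v ∧ 1 ≤ v ∧ v ≤ (xs.length : Int)) := by
          rintro ⟨_, h1, _⟩
          omega
        simp only [pvCore, if_neg hcond]
        conv_lhs => rw [htgr]
        rw [core_skip _ _ _ _ hgv]
        rw [ih _ v (some v) hlr hpr hrperm (by rintro w ⟨rfl⟩; exact le_refl v)]
        congr 1
        omega
      · by_cases hv2 : v ≤ (xs.length : Int)
        · -- a valid rank: keep its smallest index, skip its duplicates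
          have hprevne : prev ≠ some v := by
            intro h
            have := hprev v h
            omega
          have hcondpos : prev ≠ some v ∧ 1 ≤ v ∧ v ≤ (xs.length : Int) :=
            ⟨hprevne, by omega, hv2⟩
          simp only [pvCore, if_pos hcondpos]
          conv_lhs => rw [htgr]
          rw [core_skip _ _ _ _ hgv]
          rw [ih _ v (some v) hlr hpr hrperm (by rintro w ⟨rfl⟩; exact le_refl v)]
          -- name the first occurrence of v
          rcases (mem_pvPairs xs v i).mp hpvp with ⟨k, hk, hik, hvk⟩
          have hmin : ∀ j (hj : j < xs.length), j < k → xs[j] ≠ v := by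
            intro j hj hjk hne
            have hpj : (v, (j : Int)) ∈ pvPairs xs := (mem_pvPairs xs v (j : Int)).mpr ⟨j, hj, rfl, hne.symm⟩
            have hsj : (v, (j : Int)) ∈ (v, i) :: t :=
              hperm.mem_iff.mpr (List.mem_filter.mpr ⟨hpj, by simpa using hbv⟩)
            rcases List.mem_cons.mp hsj with heq | hmem
            · have : (j : Int) = i := by
                have := congrArg Prod.snd heq
                simpa using this
              omega
            · have := hHead _ hmem
              rw [Prod.Lex.le_iff] at this
              simp only [ofLex_toLex] at this
              omega
          have hidx : PySem.List.index? xs v = some k := index?_first xs v k hk hvk.symm hmin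
          -- split the rank range at v
          unfold pvRhs
          rw [PySem.List.pyRange_one_append (max (b + 1) 1) v ((xs.length : Int) + 1)
            (by omega) (by omega)]
          rw [List.filterMap_append]
          rw [rhs_none_seg xs _ v (by
            intro q hq1 hq2
            rw [PySem.List.index?_eq_none_iff]
            intro hqx
            have := hqmem q (by omega) hqx
            omega)]
          rw [PySem.List.pyRange_one_cons (by omega : v < (xs.length : Int) + 1),
            List.filterMap_cons, hidx]
          simp only [List.nil_append]
          rw [show max (v + 1) 1 = v + 1 by omega]
          simp [hik]
        · -- rank above n: nothing else can be appended, the range is exhausted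
          have hcond : ¬ (prev ≠ some v ∧ 1 ≤ v ∧ v ≤ (xs.length : Int)) := by
            rintro ⟨_, _, h2⟩
            omega
          simp only [pvCore, if_neg hcond]
          rw [core_big _ _ _ (by
            intro p hp
            have := hall p (List.mem_cons_of_mem _ hp)
            omega)]
          symm
          unfold pvRhs
          apply rhs_none_seg
          intro q hq1 hq2
          rw [PySem.List.index?_eq_none_iff]
          intro hqx
          have := hqmem q (by omega) hqx
          omega

-- ===== VERDICT (by name: the statement is the Claim_ definition above) =====
theorem get_applicant_posts_spec : Claim_equal_get_applicant_posts := by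
  intro xs hdom
  unfold Spec_get_applicant_posts
  rw [a_eq_rhs]
  unfold get_applicant_posts_alt
  rw [sorted2_eq_sorted_lex, foldl_eq_core]
  have hlow : ∀ y ∈ xs, -2147483648 ≤ y := by
    intro y hy
    have := List.all_eq_true.mp hdom y hy
    simp only [pvDomInt, decide_eq_true_eq] at this
    exact this.1
  have hfil : (pvPairs xs).filter (fun p => decide ((-2147483649 : Int) < p.1)) = pvPairs xs := by
    apply List.filter_eq_self.mpr
    intro p hp
    rcases p with ⟨v, i⟩
    rcases (mem_pvPairs xs v i).mp hp with ⟨k, hk, hi, hv⟩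
    have := hlow xs[k] (List.getElem_mem hk)
    simp only [decide_eq_true_eq]
    omega
  have := pvMain xs (PySem.List.sorted (pvPairs xs) (fun p => toLex p)).length
    (PySem.List.sorted (pvPairs xs) (fun p => toLex p)) (-2147483649) none
    (le_refl _)
    (PySem.List.sorted_pairwise (pvPairs xs) (fun p => toLex p))
    (by rw [hfil]; exact PySem.List.sorted_perm (pvPairs xs) _ _)
    (by intro w h; cases h)
  rw [List.nil_append]
  rw [show ((-2147483649 : Int) + 1) = -2147483648 by norm_num] at this
  rw [show max (-2147483648 : Int) 1 = 1 by norm_num] at this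
  rw [show (List.map (fun iv => (iv.2, iv.1)) (PySem.List.enumerate xs)
        : List (Int × Int)) = pvPairs xs from rfl]
  exact this.symm
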